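-- pv_equiv track=rewrite | github.com/fcrawl/fcrawl | fcrawl.py | cheby_edge
-- ===== SOURCE A (Python) =====
-- from collections import defaultdict, deque, namedtuple
--
-- Point = namedtuple('Point', ['x', 'y'])
--
-- def cheby_edge(r):
--     ''' Yields all coords with Chebyshev distance r from (0, 0). '''
--     if r <= 0:
--         yield Point(0, 0)
--     else:
--         for i in range(-r, r): yield Point( i, -r)
--         for i in range(-r, r): yield Point( r,  i)
--         for i in range(-r, r): yield Point(-i,  r)
--         for i in range(-r, r): yield Point(-r, -i)
-- ===== SOURCE B (Python) =====
-- from collections import namedtuple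
--
-- Point = namedtuple('Point', ['x', 'y'])
--
-- def cheby_edge(r):
--     ''' Yields all coords with Chebyshev distance r from (0, 0). '''
--     if r <= 0:
--         yield Point(0, 0)
--         return
--     # one continuous perimeter walk: position + heading, turn left at corners
--     x, y = -r, -r
--     dx, dy = 1, 0
--     for _ in range(4):
--         for _ in range(2 * r):
--             yield Point(x, y)
--             x += dx
--             y += dy
--         dx, dy = -dy, dx
-- ===== Notes on version B (the rewrite author's own statement) =====
-- stated objective: alternative
-- what changed: Replaces A's four independent index-based slice loops by one continuous perimeter walk that maintains a position and a heading, turning 90 degrees after each completed side.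
import Mathlib
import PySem

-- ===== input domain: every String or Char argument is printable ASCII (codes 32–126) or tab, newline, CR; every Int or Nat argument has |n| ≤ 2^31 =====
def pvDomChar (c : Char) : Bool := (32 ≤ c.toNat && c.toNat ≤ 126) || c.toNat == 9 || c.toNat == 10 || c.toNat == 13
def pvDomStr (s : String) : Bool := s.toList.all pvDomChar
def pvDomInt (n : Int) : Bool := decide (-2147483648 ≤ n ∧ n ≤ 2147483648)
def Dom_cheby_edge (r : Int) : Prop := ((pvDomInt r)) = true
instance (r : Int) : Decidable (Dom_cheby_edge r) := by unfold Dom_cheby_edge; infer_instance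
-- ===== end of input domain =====

-- B replaces A's four independent slice loops by one perimeter walk with position and heading (alternative decomposition, same cost).


-- ===== PORT A =====
def cheby_edge (r : Int) : List (Int × Int) :=
  if r ≤ 0 then [(0, 0)]
  else
    (PySem.List.pyRange (-r) r 1).map (fun i => (i, -r))
    ++ (PySem.List.pyRange (-r) r 1).map (fun i => (r, i))
    ++ (PySem.List.pyRange (-r) r 1).map (fun i => (-i, r))
    ++ (PySem.List.pyRange (-r) r 1).map (fun i => (-r, -i))

-- ===== PORT B =====
-- walk n steps from (x,y) with heading (dx,dy): the yielded points and the final position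
def chebySide (x y dx dy : Int) : Nat → List (Int × Int) × Int × Int
  | 0 => ([], x, y)
  | n + 1 =>
    let t := chebySide (x + dx) (y + dy) dx dy n
    ((x, y) :: t.1, t.2)

-- outer loop: s sides of `steps` steps each, turning the heading left after each side
def chebySides (x y dx dy : Int) (steps : Nat) : Nat → List (Int × Int)
  | 0 => []
  | s + 1 =>
    let t := chebySide x y dx dy steps
    t.1 ++ chebySides t.2.1 t.2.2 (-dy) dx steps s

def cheby_edge_alt (r : Int) : List (Int × Int) :=
  if r ≤ 0 then [(0, 0)]
  else chebySides (-r) (-r) 1 0 (2 * r).toNat 4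

-- ===== PRECONDITION & SPEC =====
def Spec_cheby_edge (r : Int) (out : List (Int × Int)) : Prop := out = cheby_edge_alt r
instance (r : Int) (out : List (Int × Int)) : Decidable (Spec_cheby_edge r out) := by unfold Spec_cheby_edge; infer_instance

-- ===== CLAIM (what is proved, stated in full; the proofs are below) =====
def Claim_equal_cheby_edge : Prop := ∀ (r : Int), Dom_cheby_edge r → Spec_cheby_edge r (cheby_edge r)

-- ===== LEMMAS AND PROOFS =====
theorem chebySide_eq (dx dy : Int) (n : Nat) : ∀ (x y : Int),
    chebySide x y dx dy n =
      ((List.range n).map (fun k : Nat => (x + (k : Int) * dx, y + (k : Int) * dy)),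
        x + n * dx, y + n * dy) := by
  induction n with
  | zero => intro x y; simp [chebySide]
  | succ n ih =>
    intro x y
    simp only [chebySide, ih]
    refine Prod.ext ?_ (Prod.ext (by push_cast; ring) (by push_cast; ring))
    rw [List.range_succ_eq_map, List.map_cons, List.map_map]
    simp only [Nat.cast_zero, zero_mul, add_zero]
    congr 1
    apply List.map_congr_left
    intro k _
    simp only [Function.comp, Prod.mk.injEq]
    push_cast
    constructor <;> ring

theorem cheby_edge_spec : Claim_equal_cheby_edge := by
  intro r _
  unfold Spec_cheby_edge cheby_edge cheby_edge_alt
  by_cases h : r ≤ 0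
  · simp [h]
  · simp only [h, if_false]
    have h2 : ((2 * r).toNat : Int) = 2 * r := Int.toNat_of_nonneg (by omega)
    have hlen : (r - (-r)).toNat = (2 * r).toNat := by omega
    simp only [chebySides, chebySide_eq, PySem.List.pyRange_one, hlen, h2,
      List.append_nil, List.append_assoc]
    refine congrArg₂ _ ?_ (congrArg₂ _ ?_ (congrArg₂ _ ?_ ?_)) <;>
    · rw [List.map_map]
      apply List.map_congr_left
      intro k _
      simp only [Function.comp]
      simp only [Prod.mk.injEq]
      constructor <;> push_cast <;> ring
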